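-- pv_equiv track=rewrite | github.com/hfsnetbr/camdiscview | camera_discovery_gui.py | guess_best_url
-- ===== SOURCE A (Python) =====
-- def guess_best_url(result: dict) -> str | None:
--     streams = result.get("streams", [])
--     if streams:
--         return streams[0]["url"]
--
--     candidates = result.get("rtsp_candidates", [])
--     for preferred in ("/onvif1", "/onvif2"):
--         for candidate in candidates:
--             if candidate.get("path") == preferred:
--                 return candidate["url"]
--
--     if candidates:
--         return candidates[0]["url"]
--
--     return None
-- ===== SOURCE B (Python) =====
-- def guess_best_url(result: dict) -> str | None:
--     streams = result.get("streams", [])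
--     if streams:
--         return streams[0]["url"]
--
--     best = None
--     best_rank = 3
--     for candidate in result.get("rtsp_candidates", []):
--         rank = {"/onvif1": 0, "/onvif2": 1}.get(candidate.get("path"), 2)
--         if best is None or rank < best_rank:
--             best, best_rank = candidate, rank
--             if rank == 0:
--                 break
--
--     return best["url"] if best is not None else None
-- ===== Notes on version B (the rewrite author's own statement) =====
-- stated objective: alternative
-- what changed: Replaces A's staged preference scans (rescan the candidate list once per preferred path, then a separate fallback to candidates[0]) by a single pass that keeps a running minimum-rank candidate (rank 0='/onvif1', 1='/onvif2', 2=anything else; first occurrence wins, early break on rank 0) and reads ['url'] only once at the end.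
import Mathlib
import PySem

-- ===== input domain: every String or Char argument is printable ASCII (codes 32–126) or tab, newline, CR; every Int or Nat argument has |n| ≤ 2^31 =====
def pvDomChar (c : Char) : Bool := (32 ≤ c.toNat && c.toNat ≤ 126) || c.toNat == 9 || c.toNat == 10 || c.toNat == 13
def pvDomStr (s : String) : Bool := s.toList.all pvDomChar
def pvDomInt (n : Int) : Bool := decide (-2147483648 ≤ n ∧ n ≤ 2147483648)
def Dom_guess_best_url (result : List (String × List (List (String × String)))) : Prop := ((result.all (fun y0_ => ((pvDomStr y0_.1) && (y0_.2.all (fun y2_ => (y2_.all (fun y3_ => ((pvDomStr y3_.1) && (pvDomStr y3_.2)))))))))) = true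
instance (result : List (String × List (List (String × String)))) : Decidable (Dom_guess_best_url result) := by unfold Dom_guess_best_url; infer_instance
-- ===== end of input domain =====

-- B replaces A's preference-ordered rescans by ONE pass keeping a running minimum-rank
-- candidate (rank 0 = '/onvif1', 1 = '/onvif2', 2 = other; first occurrence wins), with an
-- early exit when rank 0 is found (alternative structure; return value only).

-- ===== PORT A =====
-- inner 'for candidate in candidates: if candidate.get("path") == preferred: return candidate["url"]'
def pvScanA (preferred : String) : List (List (String × String)) → Option String
  | [] => none
  | c :: rest =>
      if (PySem.Dict.mk c).get? "path" = some preferred then (PySem.Dict.mk c).get? "url"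
      else pvScanA preferred rest

def guess_best_url (result : List (String × List (List (String × String)))) : Option String :=
  let streams := (PySem.Dict.mk result).getD "streams" []
  match streams with
  | s :: _ => (PySem.Dict.mk s).get? "url"
  | [] =>
    let candidates := (PySem.Dict.mk result).getD "rtsp_candidates" []
    match pvScanA "/onvif1" candidates with
    | some u => some u
    | none =>
      match pvScanA "/onvif2" candidates with
      | some u => some u
      | none =>
        match candidates with
        | c :: _ => (PySem.Dict.mk c).get? "url"
        | [] => none

-- ===== PORT B =====
-- rank = preference-table .get(candidate.get("path"), 2): 0 for /onvif1, 1 for /onvif2, else 2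
def pvRankB (c : List (String × String)) : Int :=
  match (PySem.Dict.mk c).get? "path" with
  | some p => (PySem.Dict.mk [("/onvif1", (0 : Int)), ("/onvif2", (1 : Int))]).getD p 2
  | none => 2

-- the for-loop over candidates carrying (best, best_rank), with the 'break' on rank == 0
def pvBestLoop : List (List (String × String)) → Option (List (String × String)) → Int →
    Option (List (String × String))
  | [], best, _ => best
  | c :: rest, best, bestRank =>
      let rank := pvRankB c
      if best.isNone || decide (rank < bestRank) then
        if rank == 0 then some c
        else pvBestLoop rest (some c) rank
      else pvBestLoop rest best bestRank

def guess_best_url_alt (result : List (String × List (List (String × String)))) : Option String :=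
  let streams := (PySem.Dict.mk result).getD "streams" []
  match streams with
  | s :: _ => (PySem.Dict.mk s).get? "url"
  | [] =>
    match pvBestLoop ((PySem.Dict.mk result).getD "rtsp_candidates" []) none 3 with
    | some b => (PySem.Dict.mk b).get? "url"
    | none => none

-- ===== PRECONDITION & SPEC =====
-- first candidate whose "path" equals p (used by Pre_ to name the entry both programs select)
def pvFirstWith (p : String) (cs : List (List (String × String))) :
    Option (List (String × String)) :=
  cs.find? (fun c => (PySem.Dict.mk c).get? "path" == some p)

-- the single entry whose "url" the Python reads: the first stream, else the first '/onvif1'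
-- candidate, else the first '/onvif2' candidate, else the first candidate
def pvSelected (result : List (String × List (List (String × String)))) :
    Option (List (String × String)) :=
  match (PySem.Dict.mk result).getD "streams" [] with
  | s :: _ => some s
  | [] =>
    let cs := (PySem.Dict.mk result).getD "rtsp_candidates" []
    (pvFirstWith "/onvif1" cs).or ((pvFirstWith "/onvif2" cs).or cs.head?)

-- Pre_ excludes exactly the inputs on which the Python A raises KeyError: the single entry it
-- selects (pvSelected) lacks a "url" key. B raises on exactly the same inputs.
def Pre_guess_best_url (result : List (String × List (List (String × String)))) : Prop :=
  ((pvSelected result).all (fun c => ((PySem.Dict.mk c).get? "url").isSome)) = true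
instance (result : List (String × List (List (String × String)))) : Decidable (Pre_guess_best_url result) := by unfold Pre_guess_best_url; infer_instance

def pvWitness_guess_best_url : (List (String × List (List (String × String)))) :=
  [("rtsp_candidates", [[("path", "/onvif2"), ("url", "rtsp://x/onvif2")], [("path", "/y")]])]

def Spec_guess_best_url (result : List (String × List (List (String × String)))) (out : Option String) : Prop := out = guess_best_url_alt result
instance (result : List (String × List (List (String × String)))) (out : Option String) : Decidable (Spec_guess_best_url result out) := by unfold Spec_guess_best_url; infer_instance

-- ===== CLAIM (what is proved, stated in full; the proofs are below) =====
def Claim_equal_guess_best_url : Prop := ∀ (result : List (String × List (List (String × String)))), Dom_guess_best_url result → Pre_guess_best_url result → Spec_guess_best_url result (guess_best_url result)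

-- ===== LEMMAS AND PROOFS =====

theorem pvPathBeq_false {c : List (String × String)} {p : String}
    (h : ¬ (PySem.Dict.mk c).get? "path" = some p) :
    ((PySem.Dict.mk c).get? "path" == some p) = false := by
  simp [beq_eq_false_iff_ne]; exact h

theorem pvScanA_eq_firstWith (p : String) (cs : List (List (String × String))) :
    pvScanA p cs = (pvFirstWith p cs).bind (fun c => (PySem.Dict.mk c).get? "url") := by
  induction cs with
  | nil => rfl
  | cons c rest ih =>
      simp only [pvScanA, pvFirstWith, List.find?_cons]
      by_cases h : (PySem.Dict.mk c).get? "path" = some p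
      · simp [h]
      · simp [h, pvPathBeq_false h, ih, pvFirstWith]

-- pvRankB as a plain case split on the "path" entry
theorem pvRankB_cases (c : List (String × String)) :
    pvRankB c =
      if (PySem.Dict.mk c).get? "path" = some "/onvif1" then 0
      else if (PySem.Dict.mk c).get? "path" = some "/onvif2" then 1
      else 2 := by
  unfold pvRankB
  cases h : (PySem.Dict.mk c).get? "path" with
  | none => simp
  | some p =>
      simp only []
      by_cases h1 : p = "/onvif1"
      · subst h1; simp [PySem.Dict.getD, PySem.Dict.get?_mk_cons]
      · by_cases h2 : p = "/onvif2"
        · subst h2; simp [PySem.Dict.getD, PySem.Dict.get?_mk_cons]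
        · have e1 : ("/onvif1" == p) = false := by
            simp [beq_eq_false_iff_ne]; exact fun h => h1 h.symm
          have e2 : ("/onvif2" == p) = false := by
            simp [beq_eq_false_iff_ne]; exact fun h => h2 h.symm
          simp [PySem.Dict.getD, PySem.Dict.get?, e1, e2, h1, h2]

-- invariant: with best_rank = 1 the loop returns the first '/onvif1' candidate, else best
theorem pvBestLoop_one (rest : List (List (String × String))) (b : List (String × String)) :
    pvBestLoop rest (some b) 1 = (pvFirstWith "/onvif1" rest).or (some b) := by
  induction rest generalizing b with
  | nil => rfl
  | cons c rs ih =>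
      simp only [pvBestLoop, pvFirstWith, List.find?_cons]
      rw [pvRankB_cases c]
      by_cases h1 : (PySem.Dict.mk c).get? "path" = some "/onvif1"
      · simp [h1]
      · by_cases h2 : (PySem.Dict.mk c).get? "path" = some "/onvif2"
        · simp [h2, ih, pvFirstWith]
        · simp [h1, h2, pvPathBeq_false h1, ih, pvFirstWith]

-- invariant: with best_rank = 2 the loop returns first '/onvif1', else first '/onvif2', else best
theorem pvBestLoop_two (rest : List (List (String × String))) (b : List (String × String)) :
    pvBestLoop rest (some b) 2 =
      (pvFirstWith "/onvif1" rest).or ((pvFirstWith "/onvif2" rest).or (some b)) := by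
  induction rest generalizing b with
  | nil => rfl
  | cons c rs ih =>
      simp only [pvBestLoop, pvFirstWith, List.find?_cons]
      rw [pvRankB_cases c]
      by_cases h1 : (PySem.Dict.mk c).get? "path" = some "/onvif1"
      · simp [h1]
      · by_cases h2 : (PySem.Dict.mk c).get? "path" = some "/onvif2"
        · simp [h2, pvBestLoop_one, pvFirstWith]
        · simp [h1, h2, pvPathBeq_false h1, pvPathBeq_false h2, ih, pvFirstWith]

-- the whole loop computes "first '/onvif1', else first '/onvif2', else the first candidate"
theorem pvBestLoop_spec (cs : List (List (String × String))) :
    pvBestLoop cs none 3 =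
      (pvFirstWith "/onvif1" cs).or ((pvFirstWith "/onvif2" cs).or cs.head?) := by
  cases cs with
  | nil => rfl
  | cons c rs =>
      simp only [pvBestLoop, pvFirstWith, List.find?_cons, Option.isNone_none, Bool.true_or,
        if_true, List.head?_cons]
      rw [pvRankB_cases c]
      by_cases h1 : (PySem.Dict.mk c).get? "path" = some "/onvif1"
      · simp [h1]
      · by_cases h2 : (PySem.Dict.mk c).get? "path" = some "/onvif2"
        · simp [h2, pvBestLoop_one, pvFirstWith]
        · simp [h1, h2, pvPathBeq_false h1, pvPathBeq_false h2, pvBestLoop_two, pvFirstWith]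

-- ===== VERDICT (by name: the statement is the Claim_ definition above) =====
theorem guess_best_url_spec : Claim_equal_guess_best_url := by
  intro result _ hpre
  unfold Spec_guess_best_url guess_best_url guess_best_url_alt
  unfold Pre_guess_best_url pvSelected at hpre
  cases hs : (PySem.Dict.mk result).getD "streams" [] with
  | cons s rest => rfl
  | nil =>
    rw [hs] at hpre
    simp only
    rw [pvBestLoop_spec, pvScanA_eq_firstWith, pvScanA_eq_firstWith]
    set cs := (PySem.Dict.mk result).getD "rtsp_candidates" [] with hcs
    simp only at hpre
    cases h1 : pvFirstWith "/onvif1" cs with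
    | some c =>
        simp only [h1, Option.some_or, Option.all_some] at hpre ⊢
        obtain ⟨u, hu⟩ := Option.isSome_iff_exists.mp hpre
        simp [hu]
    | none =>
        simp only [h1, Option.none_or] at hpre ⊢
        cases h2 : pvFirstWith "/onvif2" cs with
        | some c =>
            simp only [h2, Option.some_or, Option.all_some] at hpre ⊢
            obtain ⟨u, hu⟩ := Option.isSome_iff_exists.mp hpre
            simp [hu]
        | none =>
            simp only [h2, Option.none_or, Option.bind_none] at hpre ⊢
            cases hc : cs with
            | nil => rfl
            | cons c rs =>
                rw [hc] at hpre
                simp only [List.head?_cons, Option.all_some] at hpre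
                obtain ⟨u, hu⟩ := Option.isSome_iff_exists.mp hpre
                simp [hu]
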